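-- pv_equiv track=rewrite | github.com/rdtg94/LIACD_FCUP | Python_classes/class_8/IP075.py | word_types
-- ===== SOURCE A (Python) =====
-- def word_types(lst):
--     count_lower = 0
--     count_upper = 0
--     count_other = 0
--     for word in lst:
--         if word.islower():
--             count_lower += 1
--         elif word.isupper():
--             count_upper += 1
--         else:
--             count_other += 1
--     return (count_lower, count_upper, count_other)
-- ===== SOURCE B (Python) =====
-- def word_types(lst):
--     count_lower = sum(w.islower() for w in lst)
--     count_upper = sum(w.isupper() for w in lst)
--     return (count_lower, count_upper, len(lst) - count_lower - count_upper)
-- ===== Notes on version B (the rewrite author's own statement) =====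
-- stated objective: simpler
-- what changed: Replaces the single loop with three explicit counters by two independent counting passes (sum of islower, sum of isupper) and derives the third count arithmetically as len(lst) minus the other two, relying on islower/isupper being mutually exclusive.
import Mathlib
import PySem

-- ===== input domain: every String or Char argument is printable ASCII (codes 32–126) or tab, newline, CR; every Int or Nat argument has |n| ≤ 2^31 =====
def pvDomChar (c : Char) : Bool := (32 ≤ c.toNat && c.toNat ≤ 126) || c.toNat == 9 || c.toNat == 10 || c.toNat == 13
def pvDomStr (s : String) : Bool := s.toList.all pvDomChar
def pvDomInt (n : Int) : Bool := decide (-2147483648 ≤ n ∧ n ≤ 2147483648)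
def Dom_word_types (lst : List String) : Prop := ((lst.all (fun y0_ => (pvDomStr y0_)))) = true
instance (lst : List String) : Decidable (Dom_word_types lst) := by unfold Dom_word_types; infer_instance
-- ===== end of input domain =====

-- B moves from one loop with three counters to two counting passes plus arithmetic for the third; objective: simpler.

-- Hand-written port of Python str.islower()/str.isupper(), exact on the ASCII domain:
-- islower ⇔ at least one cased character and no uppercase character (cased on ASCII = a-z/A-Z).
def strIslower (s : String) : Bool :=
  s.toList.any PySem.Chars.islower && s.toList.all (fun c => !(PySem.Chars.isupper c))
def strIsupper (s : String) : Bool :=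
  s.toList.any PySem.Chars.isupper && s.toList.all (fun c => !(PySem.Chars.islower c))

-- ===== PORT A =====
def word_types (lst : List String) : Int × Int × Int :=
  let st := lst.foldl (fun (acc : Int × Int × Int) word =>
    if strIslower word then (acc.1 + 1, acc.2.1, acc.2.2)
    else if strIsupper word then (acc.1, acc.2.1 + 1, acc.2.2)
    else (acc.1, acc.2.1, acc.2.2 + 1)) (0, 0, 0)
  st

-- ===== PORT B =====
def word_types_alt (lst : List String) : Int × Int × Int :=
  let count_lower : Int := (lst.countP strIslower : Nat)
  let count_upper : Int := (lst.countP strIsupper : Nat)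
  (count_lower, count_upper, (lst.length : Int) - count_lower - count_upper)

-- ===== PRECONDITION & SPEC =====
def Spec_word_types (lst : List String) (out : Int × Int × Int) : Prop := out = word_types_alt lst
instance (lst : List String) (out : Int × Int × Int) : Decidable (Spec_word_types lst out) := by unfold Spec_word_types; infer_instance

-- ===== CLAIM (what is proved, stated in full; the proofs are below) =====
def Claim_equal_word_types : Prop := ∀ (lst : List String), Dom_word_types lst → Spec_word_types lst (word_types lst)

-- ===== LEMMAS AND PROOFS =====
theorem word_types_foldl (lst : List String) (a b c : Int) :
    lst.foldl (fun (acc : Int × Int × Int) word =>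
      if strIslower word then (acc.1 + 1, acc.2.1, acc.2.2)
      else if strIsupper word then (acc.1, acc.2.1 + 1, acc.2.2)
      else (acc.1, acc.2.1, acc.2.2 + 1)) (a, b, c)
    = (a + (lst.countP strIslower : Nat), b + (lst.countP strIsupper : Nat),
       c + (lst.length : Int) - (lst.countP strIslower : Nat) - (lst.countP strIsupper : Nat)) := by
  induction lst generalizing a b c with
  | nil => simp
  | cons w t ih =>
    have hm : ¬ (strIslower w = true ∧ strIsupper w = true) := by
      simp only [strIslower, strIsupper, Bool.and_eq_true, List.any_eq_true, List.all_eq_true]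
      rintro ⟨⟨⟨x, hx, hxl⟩, hnoup⟩, ⟨y, hy, hyu⟩, _⟩
      have := hnoup y hy
      simp [hyu] at this
    simp only [List.foldl_cons, List.countP_cons, List.length_cons]
    by_cases hl : strIslower w
    · have hu : strIsupper w = false := by
        rcases Bool.eq_false_or_eq_true (strIsupper w) with h | h
        · exact absurd ⟨hl, h⟩ hm
        · exact h
      simp only [hl, hu, if_true, ih]
      refine Prod.ext (by push_cast; ring) (Prod.ext (by push_cast; simp) (by push_cast; ring))
    · by_cases hu : strIsupper w
      · simp only [hl, hu, if_true, if_false, Bool.false_eq_true, ih]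
        refine Prod.ext (by push_cast; simp) (Prod.ext (by push_cast; ring) (by push_cast; ring))
      · simp only [hl, hu, Bool.false_eq_true, ih]
        refine Prod.ext (by push_cast; simp) (Prod.ext (by push_cast; simp) (by push_cast; ring))

-- ===== VERDICT (by name: the statement is the Claim_ definition above) =====
theorem word_types_spec : Claim_equal_word_types := by
  intro lst _
  unfold Spec_word_types word_types word_types_alt
  simp [word_types_foldl]
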